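-- pv_equiv track=rewrite | github.com/A-Arnob79/CSE221_Algorithms | LAB - 02/LAB - 02_D.py | find_first_one
-- ===== SOURCE A (Python) =====
-- def find_first_one(S):
--   l = 0
--   r = (len(S)-1)
--   index = -1
--
--   while l <= r:
--     mid = (l+ r)// 2
--     if S[mid]== '1':
--       index = mid
--       r =(mid - 1)
--     else: l = (mid + 1)
--
--   if index == -1: return -1
--   else: return index + 1
-- ===== SOURCE B (Python) =====
-- def find_first_one(S):
--   # Divide-and-conquer on the segment itself: recurse on slices, no l/r/best
--   # bookkeeping; a '1' at the midpoint is the answer unless the left half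
--   # yields a (deeper) hit.
--   def go(seg, base):
--     if not seg:
--       return None
--     mid = (len(seg) - 1) // 2
--     if seg[mid] == '1':
--       left = go(seg[:mid], base)
--       return left if left is not None else base + mid
--     return go(seg[mid+1:], base + mid + 1)
--
--   res = go(S, 0)
--   return -1 if res is None else res + 1
-- ===== Notes on version B (the rewrite author's own statement) =====
-- stated objective: alternative
-- what changed: A's iterative while-loop over (l, r, index) bounds is replaced by a divide-and-conquer recursion on the string slices themselves: each call inspects the midpoint of its segment, combines the left half's Option result with the midpoint hit via a fallback, and the -1 sentinel disappears in favour of None.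
import Mathlib
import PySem

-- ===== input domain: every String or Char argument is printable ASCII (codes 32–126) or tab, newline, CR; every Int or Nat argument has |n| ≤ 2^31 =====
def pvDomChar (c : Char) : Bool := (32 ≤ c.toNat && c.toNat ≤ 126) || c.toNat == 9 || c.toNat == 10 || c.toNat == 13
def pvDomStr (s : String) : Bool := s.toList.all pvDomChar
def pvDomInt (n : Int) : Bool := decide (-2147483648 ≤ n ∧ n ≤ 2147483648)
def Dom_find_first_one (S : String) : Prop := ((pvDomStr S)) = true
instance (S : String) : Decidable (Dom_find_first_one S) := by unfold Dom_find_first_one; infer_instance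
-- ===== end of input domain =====

-- B replaces A's iterative (l, r, index) while-loop by a divide-and-conquer recursion on string slices combining Option results; alternative decomposition, same values.


-- ===== PORT A =====
-- A's while-loop as structural recursion on a fuel that bounds the iteration
-- count (the interval [l,r] strictly shrinks each step, so fuel = |S| + 1 is
-- never exhausted: the loop always exits through its own l > r test).
def pvLoopA (cs : List Char) (fuel : Nat) (l r idx : Int) : Int :=
  match fuel with
  | 0 => idx
  | fuel + 1 =>
    if l ≤ r then
      let mid := PySem.Int.floordiv (l + r) 2
      if PySem.List.pyGet? cs mid = some '1' then
        pvLoopA cs fuel l (mid - 1) mid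
      else
        pvLoopA cs fuel (mid + 1) r idx
    else idx

def find_first_one (S : String) : Int :=
  let idx := pvLoopA S.toList (S.toList.length + 1) 0 (PySem.Str.len S - 1) (-1)
  if idx = -1 then -1 else idx + 1

-- ===== PORT B =====
-- B's recursive go(seg, base) on the slices themselves; seg[:mid] / seg[mid+1:]
-- with 0 ≤ mid < len(seg) are exactly List.take mid / List.drop (mid+1);
-- `left if left is not None else base + mid` is Option.orElse.
def pvGoB (seg : List Char) (base : Int) : Option Int :=
  if seg = [] then none
  else
    let mid := (seg.length - 1) / 2
    if PySem.List.pyGet? seg (mid : Int) = some '1' then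
      (pvGoB (seg.take mid) base).orElse (fun _ => some (base + mid))
    else
      pvGoB (seg.drop (mid + 1)) (base + mid + 1)
termination_by seg.length
decreasing_by
  · rename_i h _
    have : seg.length ≠ 0 := fun h0 => h (List.eq_nil_of_length_eq_zero h0)
    simp [List.length_take]; omega
  · rename_i h _
    have : seg.length ≠ 0 := fun h0 => h (List.eq_nil_of_length_eq_zero h0)
    simp; omega

def find_first_one_alt (S : String) : Int :=
  match pvGoB S.toList 0 with
  | none => -1
  | some i => i + 1

-- ===== PRECONDITION & SPEC =====
def Spec_find_first_one (S : String) (out : Int) : Prop := out = find_first_one_alt S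
instance (S : String) (out : Int) : Decidable (Spec_find_first_one S out) := by unfold Spec_find_first_one; infer_instance

-- ===== CLAIM =====
def Claim_equal_find_first_one : Prop := ∀ (S : String), Dom_find_first_one S → Spec_find_first_one S (find_first_one S)

-- ===== LEMMAS AND PROOFS =====

-- Main invariant: the loop on interval [l, l+n-1] with fallback idx computes
-- what go does on the corresponding slice, with Option.getD giving the fallback.
theorem pvLoopA_eq_goB (cs : List Char) (fuel : Nat) :
    ∀ (l n : Nat) (idx : Int), n < fuel → l + n ≤ cs.length →
    pvLoopA cs fuel l ((l : Int) + n - 1) idx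
      = (pvGoB ((cs.drop l).take n) l).getD idx := by
  induction fuel with
  | zero => intro l n idx h; omega
  | succ fuel ih =>
    intro l n idx hfuel hlen
    match n with
    | 0 =>
      have : ¬ ((l : Int) ≤ (l : Int) + 0 - 1) := by omega
      simp [pvLoopA, pvGoB]
    | n + 1 =>
      set m : Nat := n / 2 with hm
      have hseg : ((cs.drop l).take (n+1)).length = n + 1 := by
        simp; omega
      have hne : (cs.drop l).take (n+1) ≠ [] := by
        intro h0; rw [h0] at hseg; simp at hseg
      have hmidloc : (((cs.drop l).take (n+1)).length - 1) / 2 = m := by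
        rw [hseg]; simp [hm]
      have hmid : PySem.Int.floordiv ((l : Int) + ((l : Int) + ((n+1 : Nat) : Int) - 1)) 2
          = ((l + m : Nat) : Int) := by
        rw [PySem.Int.floordiv_eq_ediv_of_pos (by omega)]
        push_cast; omega
      have hmn : m < n + 1 := by omega
      have hget : PySem.List.pyGet? ((cs.drop l).take (n+1)) ((m : Nat) : Int)
          = PySem.List.pyGet? cs (((l + m : Nat) : Nat) : Int) := by
        rw [PySem.List.pyGet?_natCast, PySem.List.pyGet?_natCast]
        rw [List.getElem?_take_of_lt hmn, List.getElem?_drop]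
      have hle : ((l : Int) ≤ (l : Int) + ((n+1 : Nat) : Int) - 1) := by push_cast; omega
      rw [pvLoopA]
      rw [if_pos hle]
      rw [pvGoB]
      rw [if_neg hne]
      simp only [hmidloc, hmid, hget]
      by_cases h1 : PySem.List.pyGet? cs (((l + m : Nat) : Nat) : Int) = some '1'
      · rw [if_pos h1, if_pos h1]
        -- left half: interval [l, l+m-1], slice take m, fallback l+m
        have htk : ((cs.drop l).take (n+1)).take m = (cs.drop l).take m := by
          rw [List.take_take]; congr 1; omega
        have harg : ((l + m : Nat) : Int) - 1 = (l : Int) + (m : Nat) - 1 := by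
          push_cast; ring
        rw [harg, htk]
        rw [ih l m ((l + m : Nat) : Int) (by omega) (by omega)]
        cases pvGoB ((cs.drop l).take m) (l : Int) with
        | none => simp [Option.orElse]
        | some v => simp [Option.orElse]
      · rw [if_neg h1, if_neg h1]
        -- right half: interval [l+m+1, l+n], slice drop (m+1), base l+m+1
        have hdr : ((cs.drop l).take (n+1)).drop (m+1)
            = (cs.drop (l + (m+1))).take (n + 1 - (m+1)) := by
          rw [List.drop_take, List.drop_drop]
          try congr 1
          try omega
        have harg : ((l + m : Nat) : Int) + 1 = ((l + (m+1) : Nat) : Int) := by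
          push_cast; ring
        have harg2 : ((l : Int) + ((n+1 : Nat) : Int) - 1)
            = ((l + (m+1) : Nat) : Int) + ((n + 1 - (m+1) : Nat) : Int) - 1 := by
          push_cast; omega
        rw [harg, harg2, hdr]
        rw [ih (l + (m+1)) (n + 1 - (m+1)) idx (by omega) (by omega)]
        have hb : ((l + (m+1) : Nat) : Int) = (l : Int) + (m : Int) + 1 := by
          push_cast; ring
        rw [hb]

-- every value go returns is ≥ 0 when base ≥ 0, so A's `idx = -1` test is `none`
theorem pvGoB_nonneg (k : Nat) : ∀ (seg : List Char) (base v : Int),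
    seg.length ≤ k → 0 ≤ base → pvGoB seg base = some v → 0 ≤ v := by
  induction k with
  | zero =>
    intro seg base v hk hb h
    have : seg = [] := List.eq_nil_of_length_eq_zero (by omega)
    rw [this, pvGoB] at h; simp at h
  | succ k ih =>
    intro seg base v hk hb h
    rw [pvGoB] at h
    by_cases hne : seg = []
    · rw [if_pos hne] at h; simp at h
    · rw [if_neg hne] at h
      simp only [] at h
      have hpos : 0 < seg.length := List.length_pos_of_ne_nil hne
      set mid := (seg.length - 1) / 2 with hm
      have hmlt : mid < seg.length := by omega
      by_cases h1 : PySem.List.pyGet? seg ((mid : Nat) : Int) = some '1'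
      · rw [if_pos h1] at h
        cases hgo : pvGoB (seg.take mid) base with
        | none => rw [hgo] at h; simp [Option.orElse] at h; omega
        | some w =>
          rw [hgo] at h; simp [Option.orElse] at h
          have := ih (seg.take mid) base w (by simp; omega) hb hgo
          omega
      · rw [if_neg h1] at h
        exact ih (seg.drop (mid + 1)) (base + mid + 1) v (by simp; omega)
          (by omega) h

-- ===== VERDICT =====
theorem find_first_one_spec : Claim_equal_find_first_one := by
  intro S _
  unfold Spec_find_first_one find_first_one find_first_one_alt
  have hlen : PySem.Str.len S = (S.toList.length : Int) := by
    simp [PySem.Str.len_eq]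
  have h := pvLoopA_eq_goB S.toList (S.toList.length + 1) 0 S.toList.length (-1)
    (by omega) (by omega)
  simp only [Nat.cast_zero, List.drop_zero, List.take_length] at h
  have harg : (0 : Int) + (S.toList.length : Int) - 1 = PySem.Str.len S - 1 := by
    rw [hlen]; ring
  rw [harg] at h
  rw [h]
  cases hgo : pvGoB S.toList 0 with
  | none => simp
  | some v =>
    have hv : 0 ≤ v := pvGoB_nonneg S.toList.length S.toList 0 v le_rfl le_rfl hgo
    simp
    omega
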